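-- pv_equiv track=rewrite | github.com/Goncalo448/LA2 | treino1/formata.py | formata
-- ===== SOURCE A (Python) =====
-- def apagaEspaços(string):
--     pos = 0
--     while(string[pos] == " "):
--         pos += 1
--
--     return string[pos:]
--
-- def subStrings(string):
--     lista = []
--     marcador = 0
--     for pos in range(0,len(string)):
--         if string[pos] == ';' or string[pos] == '{' or string[pos] == '}':
--             lista.append(string[marcador:pos+1])
--             marcador = pos+1
--
--     return lista
--
-- def formata(codigo):
--     lista = subStrings(codigo)
--     for x in range(0,len(lista)):
--         lista[x] = apagaEspaços(lista[x])
--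
--     codigo = "".join(lista)
--     flag = 0
--     novoCodigo = ""
--     comprimento = len(codigo)
--     for index in range(0,comprimento):
--
--         if index == comprimento-1:
--         	novoCodigo += codigo[index]
--         elif codigo[index] == ';' and index+1 < len(codigo) and codigo[index+1] == '}':
--             flag -= 2
--             novoCodigo += codigo[index] + "\n" + (" "*flag)
--         elif index != comprimento-1 and codigo[index] == ';':
--             novoCodigo += codigo[index] + "\n" + (" "*flag)
--         elif index != comprimento-1 and codigo[index] == '{':
--             flag += 2
--             novoCodigo += codigo[index] + "\n" + (" "*flag)
--         elif index != comprimento-1 and codigo[index] == '}':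
--         	flag -= 2
--         	novoCodigo += codigo[index] + "\n" + (" "*flag)
--         else:
--             novoCodigo += codigo[index]
--
--
--     return novoCodigo
-- ===== SOURCE B (Python) =====
-- def apagaEspaços(string):
--     pos = 0
--     while(string[pos] == " "):
--         pos += 1
--     return string[pos:]
--
-- def subStrings(string):
--     lista = []
--     marcador = 0
--     for pos in range(0,len(string)):
--         if string[pos] == ';' or string[pos] == '{' or string[pos] == '}':
--             lista.append(string[marcador:pos+1])
--             marcador = pos+1
--     return lista
--
-- def formata(codigo):
--     toks = [apagaEspaços(t) for t in subStrings(codigo)]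
--     if not toks:
--         return ""
--     out = []
--     indent = 0
--     for t, nxt in zip(toks, toks[1:]):
--         d = t[-1]
--         if d == '{':
--             indent += 2
--         elif d == '}' or nxt == '}':
--             indent -= 2
--         out.append(t + "\n" + " " * indent)
--     out.append(toks[-1])
--     return "".join(out)
-- ===== Notes on version B (the rewrite author's own statement) =====
-- stated objective: simpler
-- what changed: A rejoins the stripped tokens into one string and re-scans it character by character with an indexed loop and a cross-character lookahead; B makes a single token-level pass, zipping each stripped token with its successor to drive the indent counter, appending the final token raw.
import Mathlib
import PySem

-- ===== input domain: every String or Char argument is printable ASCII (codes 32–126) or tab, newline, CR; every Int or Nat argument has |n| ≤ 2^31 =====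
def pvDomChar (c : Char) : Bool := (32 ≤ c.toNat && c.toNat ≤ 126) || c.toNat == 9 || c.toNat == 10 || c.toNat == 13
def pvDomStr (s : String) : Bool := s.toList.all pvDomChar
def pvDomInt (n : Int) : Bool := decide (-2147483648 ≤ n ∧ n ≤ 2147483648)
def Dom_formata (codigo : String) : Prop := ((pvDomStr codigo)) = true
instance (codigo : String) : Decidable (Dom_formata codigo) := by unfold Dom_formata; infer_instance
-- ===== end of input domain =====

-- B replaces A's rejoin-then-indexed-character-scan (with its cross-character lookahead) by a
-- single token-level pass pairing each stripped token with its successor via zip; objective: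
-- simpler decomposition, same cost.

-- ===== PORT A =====
-- while(string[pos] == " "): pos += 1; return string[pos:]  — the while loop as structural
-- recursion over the leading characters. (On an all-space or empty string Python would raise
-- IndexError; formata only calls this on segments ending in ';'/'{'/'}', so that case is
-- unreachable there and the [] returned here is never consulted.)
def apagaEspacos : List Char → List Char
  | [] => []
  | c :: rest => if c = ' ' then apagaEspacos rest else c :: rest

-- the for-pos loop over range(0, len(string)) with state (lista, marcador); string[pos] is
-- read inline at each comparison exactly as the Python does
def subStrings (s : List Char) : List (List Char) :=
  ((PySem.List.pyRange 0 s.length 1).foldl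
    (fun (st : List (List Char) × Int) pos =>
      if (PySem.List.pyGet? s pos).getD ' ' = ';' ∨ (PySem.List.pyGet? s pos).getD ' ' = '{'
          ∨ (PySem.List.pyGet? s pos).getD ' ' = '}' then
        (st.1 ++ [PySem.List.slice s (some st.2) (some (pos + 1))], pos + 1)
      else st)
    ([], 0)).1

-- the in-place strip loop, the join, and the indexed character loop with state
-- (flag, novoCodigo); codigo[index] is in range for every index the loop visits, so the
-- .getD default is never consulted; " " * flag with negative flag is the empty string (.toNat)
def formata (codigo : String) : String :=
  let lista := subStrings codigo.toList
  let lista2 := (PySem.List.pyRange 0 lista.length 1).foldl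
    (fun (l : List (List Char)) x => l.set x.toNat (apagaEspacos (l.getD x.toNat []))) lista
  let cs := lista2.flatten
  let comprimento := (cs.length : Int)
  String.mk ((PySem.List.pyRange 0 comprimento 1).foldl
    (fun (st : Int × List Char) index =>
      if index = comprimento - 1 then (st.1, st.2 ++ [(PySem.List.pyGet? cs index).getD ' '])
      else if (PySem.List.pyGet? cs index).getD ' ' = ';' ∧ index + 1 < (cs.length : Int)
          ∧ (PySem.List.pyGet? cs (index + 1)).getD ' ' = '}' then
        (st.1 - 2, st.2 ++ (PySem.List.pyGet? cs index).getD ' ' :: '\n' :: List.replicate (st.1 - 2).toNat ' ')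
      else if index ≠ comprimento - 1 ∧ (PySem.List.pyGet? cs index).getD ' ' = ';' then
        (st.1, st.2 ++ (PySem.List.pyGet? cs index).getD ' ' :: '\n' :: List.replicate st.1.toNat ' ')
      else if index ≠ comprimento - 1 ∧ (PySem.List.pyGet? cs index).getD ' ' = '{' then
        (st.1 + 2, st.2 ++ (PySem.List.pyGet? cs index).getD ' ' :: '\n' :: List.replicate (st.1 + 2).toNat ' ')
      else if index ≠ comprimento - 1 ∧ (PySem.List.pyGet? cs index).getD ' ' = '}' then
        (st.1 - 2, st.2 ++ (PySem.List.pyGet? cs index).getD ' ' :: '\n' :: List.replicate (st.1 - 2).toNat ' ')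
      else (st.1, st.2 ++ [(PySem.List.pyGet? cs index).getD ' ']))
    (0, [])).2

-- ===== PORT B =====
-- Source B reuses apagaEspaços/subStrings (ported above), then makes one pass over the token list
-- with an indent counter, zipping each token with its successor; t[-1] and toks[-1] are
-- pyGet? (-1) (both lists provably nonempty, so the defaults are never consulted);
-- " " * indent with negative indent is the empty string (.toNat)
def formata_alt (codigo : String) : String :=
  let toks := (subStrings codigo.toList).map apagaEspacos
  if toks = [] then ""
  else
    let st := (toks.zip toks.tail).foldl
      (fun (st : List (List Char) × Int) (p : List Char × List Char) =>
        let d := (PySem.List.pyGet? p.1 (-1)).getD ' '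
        let indent := if d = '{' then st.2 + 2
                      else if d = '}' ∨ p.2 = ['}'] then st.2 - 2
                      else st.2
        (st.1 ++ [p.1 ++ '\n' :: List.replicate indent.toNat ' '], indent))
      ([], 0)
    String.mk ((st.1 ++ [(PySem.List.pyGet? toks (-1)).getD []]).flatten)

-- ===== PRECONDITION & SPEC =====
def Spec_formata (codigo : String) (out : String) : Prop := out = formata_alt codigo
instance (codigo : String) (out : String) : Decidable (Spec_formata codigo out) := by unfold Spec_formata; infer_instance

-- ===== CLAIM (what is proved, stated in full; the proofs are below) =====
def Claim_equal_formata : Prop := ∀ (codigo : String), Dom_formata codigo → Spec_formata codigo (formata codigo)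

-- ===== LEMMAS AND PROOFS =====

def pvIsDelim (c : Char) : Bool := c = ';' || c = '{' || c = '}'

-- structural tokenizer: what subStrings computes
def pvTok (cur : List Char) : List Char → List (List Char)
  | [] => []
  | c :: rest => if pvIsDelim c then (cur ++ [c]) :: pvTok [] rest else pvTok (cur ++ [c]) rest

-- a well-formed token: delimiter-free body followed by exactly one delimiter
def pvGood (t : List Char) : Prop :=
  ∃ u d, t = u ++ [d] ∧ pvIsDelim d = true ∧ ∀ c ∈ u, pvIsDelim c = false

def pvSpaces (f : Int) : List Char := List.replicate f.toNat ' '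

-- structural form of A's character scan
def pvScanA (f : Int) : List Char → List Char
  | [] => []
  | [c] => [c]
  | c :: d :: rest =>
    if c = ';' ∧ d = '}' then c :: '\n' :: (pvSpaces (f - 2) ++ pvScanA (f - 2) (d :: rest))
    else if c = ';' then c :: '\n' :: (pvSpaces f ++ pvScanA f (d :: rest))
    else if c = '{' then c :: '\n' :: (pvSpaces (f + 2) ++ pvScanA (f + 2) (d :: rest))
    else if c = '}' then c :: '\n' :: (pvSpaces (f - 2) ++ pvScanA (f - 2) (d :: rest))
    else c :: pvScanA f (d :: rest)

-- structural form of B's token pass (the emitted pieces, final token excluded)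
def pvPieces (f : Int) : List (List Char) → List (List Char)
  | [] => []
  | [_] => []
  | t :: u :: rest =>
    let d := (PySem.List.pyGet? t (-1)).getD ' '
    let f' := if d = '{' then f + 2 else if d = '}' ∨ u = ['}'] then f - 2 else f
    (t ++ '\n' :: List.replicate f'.toNat ' ') :: pvPieces f' (u :: rest)

lemma pvGetNegOne {α : Type} (xs : List α) (d : α) (h : xs ≠ []) :
    (PySem.List.pyGet? xs (-1)).getD d = xs.getLast?.getD d := by
  have h1 : PySem.List.pyGetD xs (-1) d = xs.getLast h := PySem.List.pyGetD_neg_one xs d h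
  have h2 : xs.getLast? = some (xs.getLast h) := List.getLast?_eq_some_getLast h
  simp [PySem.List.pyGetD] at h1
  rw [h2]; simp [h1]

-- A's in-place strip loop is map
lemma pvSetMap : ∀ (k : Nat) (l : List (List Char)), k ≤ l.length →
    (PySem.List.pyRange 0 (k : Int) 1).foldl
      (fun (l : List (List Char)) x => l.set x.toNat (apagaEspacos (l.getD x.toNat []))) l
      = (l.take k).map apagaEspacos ++ l.drop k := by
  intro k
  induction k with
  | zero => intro l _; simp [PySem.List.pyRange_one_eq_nil (by omega : (0:Int) ≤ 0)]
  | succ k ih =>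
    intro l hk
    have hr : PySem.List.pyRange 0 ((k:Int) + 1) 1 = PySem.List.pyRange 0 (k:Int) 1 ++ [(k:Int)] :=
      PySem.List.pyRange_one_succ_right (by omega)
    have hcast : ((k + 1 : Nat) : Int) = (k : Int) + 1 := by push_cast; ring
    rw [hcast, hr, List.foldl_append, ih l (by omega)]
    simp only [List.foldl_cons, List.foldl_nil]
    have hlen : ((l.take k).map apagaEspacos).length = k := by
      simp [List.length_take]; omega
    have hkl : k < l.length := by omega
    have hget : ((l.take k).map apagaEspacos ++ l.drop k).getD (Int.toNat k) [] = l[k] := by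
      rw [List.getD_eq_getElem?_getD]
      rw [List.getElem?_append_right (by simp [hlen])]
      have hmin : min k l.length = k := by omega
      simp [List.getElem?_drop, hlen, hmin, List.getElem?_eq_getElem hkl]
    rw [Int.toNat_natCast] at *
    rw [hget]
    rw [List.set_append_right _ _ (by omega)]
    rw [hlen]
    simp only [Nat.sub_self]
    have hdrop : l.drop k = l[k] :: l.drop (k+1) := by
      exact (List.drop_eq_getElem_cons hkl)
    rw [hdrop]
    simp only [List.set_cons_zero]
    simp only [List.map_take]
    rw [show List.take (k+1) (List.map apagaEspacos l) = List.take k (List.map apagaEspacos l) ++ ((List.map apagaEspacos l)[k]?).toList from List.take_add_one,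
      List.getElem?_map, List.getElem?_eq_getElem hkl]
    simp

-- subStrings' indexed fold is the structural tokenizer
lemma pvSubAux (s : List Char) : ∀ (rest : List Char) (k m : Nat) (acc : List (List Char)),
    rest = s.drop k → m ≤ k → k ≤ s.length →
    ((PySem.List.pyRange (k : Int) (s.length : Int) 1).foldl
      (fun (st : List (List Char) × Int) pos =>
        if (PySem.List.pyGet? s pos).getD ' ' = ';' ∨ (PySem.List.pyGet? s pos).getD ' ' = '{'
            ∨ (PySem.List.pyGet? s pos).getD ' ' = '}' then
          (st.1 ++ [PySem.List.slice s (some st.2) (some (pos + 1))], pos + 1)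
        else st)
      (acc, (m : Int))).1
      = acc ++ pvTok ((s.drop m).take (k - m)) rest := by
  intro rest
  induction rest with
  | nil =>
    intro k m acc hrest hmk hk
    have hkl : k = s.length := by
      have := congrArg List.length hrest; simp at this; omega
    subst hkl
    rw [PySem.List.pyRange_one_eq_nil (le_refl _)]
    simp [pvTok]
  | cons c rest ih =>
    intro k m acc hrest hmk hk
    have hkl : k < s.length := by
      have := congrArg List.length hrest; simp at this; omega
    have hck : s[k]? = some c := by
      have h0 : (s.drop k)[0]? = s[k + 0]? := List.getElem?_drop
      rw [← hrest] at h0; simpa using h0.symm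
    have hrest' : rest = s.drop (k + 1) := by
      have h0 : (s.drop k).drop 1 = s.drop (k + 1) := by rw [List.drop_drop]
      rw [← hrest] at h0; simpa using h0
    rw [PySem.List.pyRange_one_cons (by exact_mod_cast hkl), List.foldl_cons]
    have hget : (PySem.List.pyGet? s (k : Int)).getD ' ' = c := by
      rw [PySem.List.pyGet?_natCast, hck]; rfl
    have htake : (s.drop m).take (k + 1 - m) = (s.drop m).take (k - m) ++ [c] := by
      have h1 : k + 1 - m = (k - m) + 1 := by omega
      rw [h1, List.take_add_one]
      have h2 : (s.drop m)[k - m]? = s[m + (k - m)]? := List.getElem?_drop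
      rw [show m + (k - m) = k by omega] at h2
      rw [h2, hck]; simp
    have hslice : PySem.List.slice s (some (m : Int)) (some ((k : Int) + 1))
        = (s.drop m).take (k + 1 - m) := by
      rw [show ((k : Int) + 1) = ((k + 1 : Nat) : Int) by push_cast; ring,
        PySem.List.slice_natCast]
    rw [hget]
    by_cases hc : c = ';' ∨ c = '{' ∨ c = '}'
    · rw [if_pos hc]
      simp only [hslice]
      rw [show ((k : Int) + 1) = ((k + 1 : Nat) : Int) by push_cast; ring]
      rw [ih (k + 1) (k + 1) _ hrest' (le_refl _) (by omega)]
      have hd : pvIsDelim c = true := by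
        simp [pvIsDelim]; rcases hc with h|h|h <;> simp [h]
      rw [show pvTok ((s.drop m).take (k - m)) (c :: rest)
          = ((s.drop m).take (k - m) ++ [c]) :: pvTok [] rest by simp [pvTok, hd]]
      simp [htake]
    · rw [if_neg hc]
      rw [show ((k : Int) + 1) = ((k + 1 : Nat) : Int) by push_cast; ring]
      rw [ih (k + 1) m acc hrest' (by omega) (by omega)]
      have hd : pvIsDelim c = false := by
        simp only [pvIsDelim, Bool.or_eq_false_iff, decide_eq_false_iff_not]
        push_neg at hc
        exact ⟨⟨hc.1, hc.2.1⟩, hc.2.2⟩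
      rw [show pvTok ((s.drop m).take (k - m)) (c :: rest)
          = pvTok ((s.drop m).take (k - m) ++ [c]) rest by simp [pvTok, hd]]
      rw [← htake]

lemma pvSubStrings_eq (s : List Char) : subStrings s = pvTok [] s := by
  have h := pvSubAux s s 0 0 [] (by simp) (le_refl _) (by omega)
  simpa [subStrings] using h

lemma pvTok_good : ∀ (rest cur : List Char), (∀ c ∈ cur, pvIsDelim c = false) →
    ∀ t ∈ pvTok cur rest, pvGood t := by
  intro rest
  induction rest with
  | nil => intro cur _ t ht; simp [pvTok] at ht
  | cons c rest ih =>
    intro cur hcur t ht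
    by_cases hc : pvIsDelim c
    · simp [pvTok, hc] at ht
      rcases ht with h | h
      · exact ⟨cur, c, h, hc, hcur⟩
      · exact ih [] (by simp) t h
    · simp [pvTok, hc] at ht
      refine ih (cur ++ [c]) ?_ t ht
      intro x hx
      rcases List.mem_append.1 hx with h | h
      · exact hcur x h
      · simp at h; subst h; simpa using hc

lemma pvApaga_good : ∀ (u : List Char) (d : Char), pvIsDelim d = true →
    (∀ c ∈ u, pvIsDelim c = false) → pvGood (apagaEspacos (u ++ [d])) := by
  intro u
  induction u with
  | nil =>
    intro d hd _
    have hds : d ≠ ' ' := by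
      simp [pvIsDelim] at hd
      rcases hd with h|h <;> [rcases h with h|h;skip] <;> subst h <;> decide
    simp [apagaEspacos, hds]
    exact ⟨[], d, by simp, hd, by simp⟩
  | cons c u ih =>
    intro d hd hcu
    by_cases hc : c = ' '
    · subst hc
      simpa [apagaEspacos] using ih d hd (fun x hx => hcu x (by simp [hx]))
    · simp [apagaEspacos, hc]
      exact ⟨c :: u, d, by simp, hd, hcu⟩

lemma pvGood_ne_nil {t : List Char} (h : pvGood t) : t ≠ [] := by
  obtain ⟨u, d, rfl, _, _⟩ := h; simp

lemma pvGood_head_rbrace {u : List Char} (h : pvGood u) :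
    u.headD ' ' = '}' ↔ u = ['}'] := by
  obtain ⟨w, d, rfl, hd, hw⟩ := h
  cases w with
  | nil => simp
  | cons c w =>
    simp only [List.cons_append, List.headD_cons]
    constructor
    · intro hc; subst hc
      have := hw '}' (by simp)
      simp [pvIsDelim] at this
    · intro hh
      exfalso
      have h1 : c = '}' := by
        have := congrArg (List.headD · ' ') hh; simpa using this
      have := hw c (by simp)
      subst h1; simp [pvIsDelim] at this

lemma pvScanA_nondelim : ∀ (u : List Char) (f : Int) (rest : List Char),
    (∀ c ∈ u, pvIsDelim c = false) → rest ≠ [] →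
    pvScanA f (u ++ rest) = u ++ pvScanA f rest := by
  intro u
  induction u with
  | nil => intro f rest _ _; simp
  | cons c u ih =>
    intro f rest hu hrest
    have hc : pvIsDelim c = false := hu c (by simp)
    have hc' : (¬c = ';' ∧ ¬c = '{') ∧ ¬c = '}' := by
      simp [pvIsDelim] at hc; exact hc
    have hne : u ++ rest ≠ [] := by simp [hrest]
    obtain ⟨x, xs, hx⟩ := List.exists_cons_of_ne_nil hne
    simp only [List.cons_append, hx]
    rw [show pvScanA f (c :: x :: xs) = c :: pvScanA f (x :: xs) by
      simp [pvScanA, hc'.1.1, hc'.1.2, hc'.2]]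
    rw [← hx, ih f rest (fun d hd => hu d (by simp [hd])) hrest]

-- the heart: A's character scan over the joined tokens = B's token pass
lemma pvMain : ∀ (toks : List (List Char)) (f : Int), toks ≠ [] →
    (∀ t ∈ toks, pvGood t) →
    pvScanA f toks.flatten = (pvPieces f toks).flatten ++ toks.getLast?.getD [] := by
  intro toks
  induction toks with
  | nil => intro f h _; exact absurd rfl h
  | cons t toks ih =>
    intro f _ hg
    obtain ⟨v, d, htv, hd, hv⟩ := hg t (by simp)
    cases toks with
    | nil =>
      simp only [List.flatten_cons, List.flatten_nil, List.append_nil]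
      rw [htv, pvScanA_nondelim v f [d] hv (by simp)]
      simp [pvPieces, pvScanA, htv]
    | cons u rest =>
      have hgu : pvGood u := hg u (by simp)
      have hune : u ≠ [] := pvGood_ne_nil hgu
      have hfl : (u :: rest).flatten ≠ [] := by
        simp only [List.flatten_cons]
        intro h0
        exact hune (List.append_eq_nil_iff.1 h0).1
      obtain ⟨h, tl, hhtl⟩ := List.exists_cons_of_ne_nil hfl
      have hhead : h = u.headD ' ' := by
        cases u with
        | nil => exact absurd rfl hune
        | cons a u' =>
          simp only [List.flatten_cons, List.cons_append] at hhtl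
          rw [List.headD_cons]
          have := congrArg (List.headD · ' ') hhtl
          simpa using this.symm
      set f' := if d = '{' then f + 2 else if d = '}' ∨ u = ['}'] then f - 2 else f with hf'
      have hs : pvScanA f (d :: h :: tl) = d :: '\n' :: (pvSpaces f' ++ pvScanA f' (h :: tl)) := by
        have hiff : h = '}' ↔ u = ['}'] := by rw [hhead]; exact pvGood_head_rbrace hgu
        simp only [pvIsDelim, Bool.or_eq_true, decide_eq_true_eq] at hd
        rcases hd with (h1 | h1) | h1 <;> subst h1
        · by_cases h2 : u = ['}']
          · have hh : h = '}' := hiff.2 h2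
            subst hh
            have hfe : f' = f - 2 := by rw [hf']; simp [h2]
            rw [hfe]
            simp [pvScanA]
          · have hh : ¬ h = '}' := fun hh0 => h2 (hiff.1 hh0)
            have hfe : f' = f := by rw [hf']; simp [h2]
            rw [hfe]
            simp [pvScanA, hh]
        · have hfe : f' = f + 2 := by rw [hf']; simp
          rw [hfe]
          simp [pvScanA]
        · have hfe : f' = f - 2 := by rw [hf']; simp
          rw [hfe]
          simp [pvScanA]
      have hdt : (PySem.List.pyGet? t (-1)).getD ' ' = d := by
        rw [pvGetNegOne t ' ' (by rw [htv]; simp), htv]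
        simp
      have hpieces : pvPieces f (t :: u :: rest)
          = (t ++ '\n' :: List.replicate f'.toNat ' ') :: pvPieces f' (u :: rest) := by
        simp only [pvPieces, hdt]
        rw [← hf']
      have hflat : (t :: u :: rest).flatten = v ++ (d :: h :: tl) := by
        simp only [List.flatten_cons] at hhtl ⊢
        rw [htv, hhtl]
        simp
      rw [hflat, pvScanA_nondelim v f _ hv (by simp), hs, ← hhtl]
      rw [ih f' (by simp) (fun x hx => hg x (by simp [hx]))]
      rw [hpieces]
      simp [htv, pvSpaces]

-- A's indexed character fold = pvScanA
lemma pvScanAux (cs : List Char) : ∀ (rest : List Char) (k : Nat) (f : Int) (acc : List Char),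
    rest = cs.drop k → k ≤ cs.length →
    ((PySem.List.pyRange (k : Int) (cs.length : Int) 1).foldl
      (fun (st : Int × List Char) index =>
        if index = (cs.length : Int) - 1 then (st.1, st.2 ++ [(PySem.List.pyGet? cs index).getD ' '])
        else if (PySem.List.pyGet? cs index).getD ' ' = ';' ∧ index + 1 < (cs.length : Int)
            ∧ (PySem.List.pyGet? cs (index + 1)).getD ' ' = '}' then
          (st.1 - 2, st.2 ++ (PySem.List.pyGet? cs index).getD ' ' :: '\n' :: List.replicate (st.1 - 2).toNat ' ')
        else if index ≠ (cs.length : Int) - 1 ∧ (PySem.List.pyGet? cs index).getD ' ' = ';' then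
          (st.1, st.2 ++ (PySem.List.pyGet? cs index).getD ' ' :: '\n' :: List.replicate st.1.toNat ' ')
        else if index ≠ (cs.length : Int) - 1 ∧ (PySem.List.pyGet? cs index).getD ' ' = '{' then
          (st.1 + 2, st.2 ++ (PySem.List.pyGet? cs index).getD ' ' :: '\n' :: List.replicate (st.1 + 2).toNat ' ')
        else if index ≠ (cs.length : Int) - 1 ∧ (PySem.List.pyGet? cs index).getD ' ' = '}' then
          (st.1 - 2, st.2 ++ (PySem.List.pyGet? cs index).getD ' ' :: '\n' :: List.replicate (st.1 - 2).toNat ' ')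
        else (st.1, st.2 ++ [(PySem.List.pyGet? cs index).getD ' ']))
      (f, acc)).2
      = acc ++ pvScanA f rest := by
  intro rest
  induction rest with
  | nil =>
    intro k f acc hrest hk
    have hkl : k = cs.length := by
      have := congrArg List.length hrest; simp at this; omega
    subst hkl
    rw [PySem.List.pyRange_one_eq_nil (le_refl _)]
    simp [pvScanA]
  | cons c rest ih =>
    intro k f acc hrest hk
    have hkl : k < cs.length := by
      have := congrArg List.length hrest; simp at this; omega
    have hck : cs[k]? = some c := by
      have h0 : (cs.drop k)[0]? = cs[k + 0]? := List.getElem?_drop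
      rw [← hrest] at h0; simpa using h0.symm
    have hget : (PySem.List.pyGet? cs (k : Int)).getD ' ' = c := by
      rw [PySem.List.pyGet?_natCast, hck]; rfl
    have hrest' : rest = cs.drop (k + 1) := by
      have h0 : (cs.drop k).drop 1 = cs.drop (k + 1) := by rw [List.drop_drop]
      rw [← hrest] at h0; simpa using h0
    rw [PySem.List.pyRange_one_cons (by exact_mod_cast hkl), List.foldl_cons, hget]
    cases rest with
    | nil =>
      have hk1 : k = cs.length - 1 := by
        have := congrArg List.length hrest; simp at this; omega
      rw [if_pos (by omega : (k : Int) = (cs.length : Int) - 1)]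
      rw [show ((k : Int) + 1) = ((k + 1 : Nat) : Int) by push_cast; ring]
      rw [PySem.List.pyRange_one_eq_nil (by omega : (cs.length : Int) ≤ ((k + 1 : Nat) : Int))]
      simp [pvScanA]
    | cons d rest2 =>
      have hk2 : k + 2 ≤ cs.length := by
        have := congrArg List.length hrest; simp at this; omega
      have hdk : cs[k+1]? = some d := by
        have h0 : (cs.drop k)[1]? = cs[k + 1]? := List.getElem?_drop
        rw [← hrest] at h0; simpa using h0.symm
      have hget2 : (PySem.List.pyGet? cs ((k : Int) + 1)).getD ' ' = d := by
        rw [show ((k : Int) + 1) = ((k + 1 : Nat) : Int) by push_cast; ring,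
          PySem.List.pyGet?_natCast, hdk]; rfl
      rw [if_neg (by omega : ¬ ((k : Int) = (cs.length : Int) - 1))]
      rw [hget2]
      have hcast : ((k : Int) + 1) = ((k + 1 : Nat) : Int) := by push_cast; ring
      by_cases h1 : c = ';' ∧ d = '}'
      · rw [if_pos ⟨h1.1, by omega, h1.2⟩]
        rw [hcast, ih (k+1) _ _ hrest' (by omega)]
        rw [show pvScanA f (c :: d :: rest2)
            = c :: '\n' :: (pvSpaces (f - 2) ++ pvScanA (f - 2) (d :: rest2)) by
          simp [pvScanA, h1.1, h1.2]]
        simp [pvSpaces]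
      · rw [if_neg (by intro h; exact h1 ⟨h.1, h.2.2⟩)]
        by_cases h2 : c = ';'
        · have hd' : ¬ d = '}' := fun hd => h1 ⟨h2, hd⟩
          rw [if_pos ⟨by omega, h2⟩]
          rw [hcast, ih (k+1) _ _ hrest' (by omega)]
          rw [show pvScanA f (c :: d :: rest2)
              = c :: '\n' :: (pvSpaces f ++ pvScanA f (d :: rest2)) by
            simp [pvScanA, h2, hd']]
          simp [pvSpaces]
        · rw [if_neg (fun h => h2 h.2)]
          by_cases h3 : c = '{'
          · rw [if_pos ⟨by omega, h3⟩]
            rw [hcast, ih (k+1) _ _ hrest' (by omega)]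
            rw [show pvScanA f (c :: d :: rest2)
                = c :: '\n' :: (pvSpaces (f + 2) ++ pvScanA (f + 2) (d :: rest2)) by
              simp [pvScanA, h2, h3]]
            simp [pvSpaces]
          · rw [if_neg (fun h => h3 h.2)]
            by_cases h4 : c = '}'
            · rw [if_pos ⟨by omega, h4⟩]
              rw [hcast, ih (k+1) _ _ hrest' (by omega)]
              rw [show pvScanA f (c :: d :: rest2)
                  = c :: '\n' :: (pvSpaces (f - 2) ++ pvScanA (f - 2) (d :: rest2)) by
                simp [pvScanA, h2, h3, h4]]
              simp [pvSpaces]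
            · rw [if_neg (fun h => h4 h.2)]
              rw [hcast, ih (k+1) _ _ hrest' (by omega)]
              rw [show pvScanA f (c :: d :: rest2) = c :: pvScanA f (d :: rest2) by
                simp [pvScanA, h2, h3, h4]]
              simp

-- B's zip fold = pvPieces (stated over the zeta-reduced body, the form simp produces)
lemma pvZipFold : ∀ (l : List (List Char)) (f : Int) (acc : List (List Char)),
    ((l.zip l.tail).foldl
      (fun (st : List (List Char) × Int) (p : List Char × List Char) =>
        (st.1 ++ [p.1 ++ '\n' :: List.replicate (if (PySem.List.pyGet? p.1 (-1)).getD ' ' = '{' then st.2 + 2 else if (PySem.List.pyGet? p.1 (-1)).getD ' ' = '}' ∨ p.2 = ['}'] then st.2 - 2 else st.2).toNat ' '], if (PySem.List.pyGet? p.1 (-1)).getD ' ' = '{' then st.2 + 2 else if (PySem.List.pyGet? p.1 (-1)).getD ' ' = '}' ∨ p.2 = ['}'] then st.2 - 2 else st.2))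
      (acc, f)).1
      = acc ++ pvPieces f l := by
  intro l
  induction l with
  | nil => intro f acc; simp [pvPieces]
  | cons t l ih =>
    intro f acc
    cases l with
    | nil => simp [pvPieces]
    | cons u rest =>
      have hz : (t :: u :: rest).zip (t :: u :: rest).tail
          = (t, u) :: ((u :: rest).zip (u :: rest).tail) := by simp
      rw [hz, List.foldl_cons]
      have hih := ih (if (PySem.List.pyGet? t (-1)).getD ' ' = '{' then f + 2
                  else if (PySem.List.pyGet? t (-1)).getD ' ' = '}' ∨ u = ['}'] then f - 2 else f)
                 (acc ++ [t ++ '\n' :: List.replicate (if (PySem.List.pyGet? t (-1)).getD ' ' = '{' then f + 2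
                  else if (PySem.List.pyGet? t (-1)).getD ' ' = '}' ∨ u = ['}'] then f - 2 else f).toNat ' '])
      simpa [pvPieces] using hih

lemma formata_eq_alt (codigo : String) : formata codigo = formata_alt codigo := by
  have hgood : ∀ t ∈ (subStrings codigo.toList).map apagaEspacos, pvGood t := by
    intro t ht
    rw [pvSubStrings_eq] at ht
    obtain ⟨t0, ht0, rfl⟩ := List.mem_map.1 ht
    obtain ⟨u, d, rfl, hd, hu⟩ := pvTok_good codigo.toList [] (by simp) t0 ht0
    exact pvApaga_good u d hd hu
  have hset : (PySem.List.pyRange 0 ((subStrings codigo.toList).length : Int) 1).foldl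
      (fun (l : List (List Char)) x => l.set x.toNat (apagaEspacos (l.getD x.toNat []))) (subStrings codigo.toList)
      = (subStrings codigo.toList).map apagaEspacos := by
    rw [pvSetMap (subStrings codigo.toList).length (subStrings codigo.toList) (le_refl _)]
    simp
  have hA : formata codigo
      = String.mk (pvScanA 0 ((subStrings codigo.toList).map apagaEspacos).flatten) := by
    simp only [formata]
    rw [hset]
    have := pvScanAux ((subStrings codigo.toList).map apagaEspacos).flatten
      ((subStrings codigo.toList).map apagaEspacos).flatten 0 0 [] (by simp) (by omega)
    simp only [Nat.cast_zero] at this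
    rw [this]
    simp
  rw [hA]
  by_cases h : (subStrings codigo.toList).map apagaEspacos = []
  · rw [h]
    simp only [formata_alt]
    rw [if_pos h]
    simp [pvScanA]
    rfl
  · simp only [formata_alt]
    rw [if_neg h]
    rw [pvZipFold]
    rw [pvMain _ 0 h hgood]
    rw [pvGetNegOne _ [] h]
    simp

-- ===== VERDICT (by name: the statement is the Claim_ definition above) =====
theorem formata_spec : Claim_equal_formata := by
  intro codigo _
  unfold Spec_formata
  exact formata_eq_alt codigo
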